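-- pv_equiv track=rewrite | github.com/UTokyoChenYe/Slope-Spam-experiment | methods/kmer_matches.py | basic_kmer_matches
-- ===== SOURCE A (Python) =====
-- from collections import Counter
--
-- def count_kmers(sequence: str, k: int) -> Counter:
--     """Calculate k-mer frequencies in a given sequence"""
--     kmers = [sequence[i:i+k] for i in range(len(sequence) - k + 1)]
--     return Counter(kmers)
--
-- def basic_kmer_matches(seq1: str, seq2: str, k: int) -> int:
--     """Calculate the number of k-mer matches between two sequences"""
--     kmer_count1 = count_kmers(seq1, k)
--     kmer_count2 = count_kmers(seq2, k)
--     matches = 0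
--     for kmer in kmer_count1:
--         if kmer in kmer_count2:
--             # matches += min(kmer_count1[kmer], kmer_count2[kmer])
--             matches += kmer_count1[kmer] * kmer_count2[kmer]
--     return matches
-- ===== SOURCE B (Python) =====
-- from collections import Counter
--
-- def basic_kmer_matches(seq1: str, seq2: str, k: int) -> int:
--     """Stream over seq1's windows, looking each up in a counter of seq2's windows."""
--     count2 = Counter(seq2[i:i+k] for i in range(len(seq2) - k + 1))
--     total = 0
--     for i in range(len(seq1) - k + 1):
--         total += count2.get(seq1[i:i+k], 0)
--     return total
-- ===== Notes on version B (the rewrite author's own statement) =====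
-- stated objective: faster
-- what changed: B builds a single Counter (for seq2 only) and streams over every sliding window of seq1, adding count2.get(window, 0) per position, instead of building two Counters and summing products of counts over the distinct keys they share.
import Mathlib
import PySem

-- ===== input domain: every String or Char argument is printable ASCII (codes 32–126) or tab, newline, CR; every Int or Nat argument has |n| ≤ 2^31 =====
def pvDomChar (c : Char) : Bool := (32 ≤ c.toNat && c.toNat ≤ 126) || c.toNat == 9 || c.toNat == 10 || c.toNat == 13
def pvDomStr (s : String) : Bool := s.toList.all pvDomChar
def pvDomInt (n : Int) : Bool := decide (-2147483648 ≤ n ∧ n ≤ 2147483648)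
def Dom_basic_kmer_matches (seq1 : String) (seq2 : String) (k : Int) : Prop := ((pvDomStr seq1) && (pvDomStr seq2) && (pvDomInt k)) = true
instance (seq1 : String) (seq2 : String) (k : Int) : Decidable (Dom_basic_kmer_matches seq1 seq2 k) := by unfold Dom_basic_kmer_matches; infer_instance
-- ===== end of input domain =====

-- B streams over seq1's windows with one Counter built for seq2 only, instead of A's two
-- Counters and a product sum over their distinct shared keys; a different decomposition.

-- ===== PORT A =====
-- the list comprehension [sequence[i:i+k] for i in range(len(sequence) - k + 1)] (k-mers as List Char)
def pvKmers (s : List Char) (k : Int) : List (List Char) :=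
  (PySem.List.pyRange 0 (PySem.List.len s - k + 1) 1).map
    (fun i => PySem.List.slice s (some i) (some (i + k)))

-- count_kmers: Counter of that k-mer list
def count_kmers (s : List Char) (k : Int) : PySem.Dict (List Char) Int :=
  PySem.Dict.counter (pvKmers s k)

def basic_kmer_matches (seq1 : String) (seq2 : String) (k : Int) : Int :=
  let kmer_count1 := count_kmers seq1.toList k
  let kmer_count2 := count_kmers seq2.toList k
  -- for kmer in kmer_count1: if kmer in kmer_count2: matches += c1[kmer] * c2[kmer]
  kmer_count1.keys.foldl
    (fun ms kmer =>  -- ms = Python's 'matches' accumulator ('matches' is a Lean keyword)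
      if kmer_count2.contains kmer then
        ms + kmer_count1.getD kmer 0 * kmer_count2.getD kmer 0
      else ms) 0

-- ===== PORT B =====
def basic_kmer_matches_alt (seq1 : String) (seq2 : String) (k : Int) : Int :=
  -- count2 = Counter(seq2[i:i+k] for i in range(len(seq2) - k + 1))
  let count2 := PySem.Dict.counter (pvKmers seq2.toList k)
  -- for i in range(len(seq1) - k + 1): total += count2.get(seq1[i:i+k], 0)
  (PySem.List.pyRange 0 (PySem.List.len seq1.toList - k + 1) 1).foldl
    (fun total i =>
      total + count2.getD (PySem.List.slice seq1.toList (some i) (some (i + k))) 0) 0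

-- ===== PRECONDITION & SPEC =====
def Spec_basic_kmer_matches (seq1 : String) (seq2 : String) (k : Int) (out : Int) : Prop := out = basic_kmer_matches_alt seq1 seq2 k
instance (seq1 : String) (seq2 : String) (k : Int) (out : Int) : Decidable (Spec_basic_kmer_matches seq1 seq2 k out) := by unfold Spec_basic_kmer_matches; infer_instance

-- ===== CLAIM (what is proved, stated in full; the proofs are below) =====
def Claim_equal_basic_kmer_matches : Prop := ∀ (seq1 : String) (seq2 : String) (k : Int), Dom_basic_kmer_matches seq1 seq2 k → Spec_basic_kmer_matches seq1 seq2 k (basic_kmer_matches seq1 seq2 k)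

-- ===== LEMMAS AND PROOFS =====

-- dropping the `if kmer in kmer_count2` filter loses nothing: the summand is 0 off the filter
theorem pv_sum_filter (l : List (List Char)) (p : List Char → Bool) (g : List Char → Int)
    (h : ∀ x ∈ l, p x = false → g x = 0) :
    ((l.filter p).map g).sum = (l.map g).sum := by
  induction l with
  | nil => rfl
  | cons a t ih =>
    have ht : ∀ x ∈ t, p x = false → g x = 0 := fun x hx => h x (List.mem_cons_of_mem a hx)
    by_cases hp : p a
    · simp [hp, ih ht]
    · simp only [Bool.not_eq_true] at hp
      simp [hp, ih ht, h a (List.mem_cons_self) hp]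

-- B's per-window sum of W2-counts  =  A's distinct-key sum of count·count products
theorem pv_sum_count_eq (W1 W2 : List (List Char)) :
    (W1.map (fun w => ((W2.count w : Nat) : Int))).sum
      = ((PySem.List.dedup W1).map
          (fun x => ((W1.count x : Nat) : Int) * ((W2.count x : Nat) : Int))).sum := by
  have hfin : (PySem.List.dedup W1).toFinset = W1.toFinset := by
    ext a; simp
  rw [Finset.sum_list_map_count,
      ← List.sum_toFinset _ (PySem.List.nodup_dedup W1), hfin]
  apply Finset.sum_congr rfl
  intro x _
  push_cast [nsmul_eq_mul]
  rw [lawful_beq_subsingleton (instBEqOfDecidableEq) (List.instBEq)]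

theorem pv_core (seq1 seq2 : String) (k : Int) :
    basic_kmer_matches seq1 seq2 k = basic_kmer_matches_alt seq1 seq2 k := by
  unfold basic_kmer_matches basic_kmer_matches_alt count_kmers
  simp only [PySem.List.foldl_if_eq_foldl_filter, PySem.List.foldl_add,
    PySem.Dict.keys_counter, ← PySem.List.dedup_eq_ofList, zero_add]
  rw [pv_sum_filter _ _ _ (by
    intro x _ hx
    rw [PySem.Dict.contains_counter] at hx
    rw [PySem.Dict.getD_counter]
    simp only [List.contains_eq_mem, decide_eq_false_iff_not] at hx
    simp [List.count_eq_zero_of_not_mem hx])]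
  have hmm : (PySem.List.pyRange 0 (PySem.List.len seq1.toList - k + 1) 1).map
      (fun i => (PySem.Dict.counter (pvKmers seq2.toList k)).getD
        (PySem.List.slice seq1.toList (some i) (some (i + k))) 0)
      = (pvKmers seq1.toList k).map
        (fun w => (PySem.Dict.counter (pvKmers seq2.toList k)).getD w 0) := by
    simp only [pvKmers, List.map_map, Function.comp_def]
  rw [hmm]
  simp only [PySem.Dict.getD_counter]
  exact (pv_sum_count_eq (pvKmers seq1.toList k) (pvKmers seq2.toList k)).symm

-- ===== VERDICT (by name: the statement is the Claim_ definition above) =====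
theorem basic_kmer_matches_spec : Claim_equal_basic_kmer_matches := by
  intro seq1 seq2 k _
  unfold Spec_basic_kmer_matches
  exact pv_core seq1 seq2 k
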